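-- pv_equiv track=rewrite | github.com/DozzzeN/SKG | gl/test_word.py | find_second_last_period_first_number
-- ===== SOURCE A (Python) =====
-- def find_second_last_period_first_number(string):
--     # 找到倒数第二个句号的位置
--     second_last_period_index = -1
--     last_period_index = -1
--
--     for i, char in enumerate(string):
--         if char == '.':
--             second_last_period_index = last_period_index
--             last_period_index = i
--
--     # 在倒数第二个句号后查找第一个数字的位置
--     if second_last_period_index != -1:
--         for i in range(second_last_period_index + 1, len(string)):
--             if string[i].isdigit():
--                 return i
--
--     # 如果没有找到数字，则返回-1
--     return -1
-- ===== SOURCE B (Python) =====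
-- def find_second_last_period_first_number(string):
--     # single forward pass: carry the first-digit-after-last-period and
--     # first-digit-after-second-last-period candidates alongside a period count
--     periods = 0
--     d_last = -1
--     d_second = -1
--     for i, ch in enumerate(string):
--         if ch == '.':
--             periods += 1
--             d_second = d_last
--             d_last = -1
--         elif ch.isdigit():
--             if periods >= 1 and d_last == -1:
--                 d_last = i
--             if periods >= 2 and d_second == -1:
--                 d_second = i
--     return d_second if periods >= 2 else -1
-- ===== Notes on version B (the rewrite author's own statement) =====
-- stated objective: alternative
-- what changed: Replaces A's two staged passes (one full scan to locate the last two periods, then a second scan from that position for a digit) with ONE forward pass whose accumulator carries the period count and the first-digit-after-last-period / first-digit-after-second-last-period candidates, rotated whenever a new period appears.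
import Mathlib
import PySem

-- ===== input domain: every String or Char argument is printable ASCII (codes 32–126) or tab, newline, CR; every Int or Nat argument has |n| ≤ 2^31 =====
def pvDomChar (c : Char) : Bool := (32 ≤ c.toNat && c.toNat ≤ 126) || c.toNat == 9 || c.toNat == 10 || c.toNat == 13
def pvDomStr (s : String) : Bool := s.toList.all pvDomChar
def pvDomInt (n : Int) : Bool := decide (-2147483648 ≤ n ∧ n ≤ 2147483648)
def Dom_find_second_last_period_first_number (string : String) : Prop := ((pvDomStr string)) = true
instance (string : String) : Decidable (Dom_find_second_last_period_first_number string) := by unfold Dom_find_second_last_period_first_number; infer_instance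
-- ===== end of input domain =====

-- B replaces A's two staged scans (locate the last two periods, then rescan for a digit)
-- by ONE forward pass whose accumulator carries the period count and the two
-- first-digit-after-period candidates; a different one-pass algorithm, same O(n).

-- ===== PORT A =====
-- A's inner loop: 'for i in range(second+1, len(string)): if string[i].isdigit(): return i'
-- (every i of the range is a valid index, so pyGetD's default is never used)
def fslScanA (l : List Char) : List Int → Int
  | [] => -1
  | i :: rest =>
      if PySem.Chars.isdigit (PySem.List.pyGetD l i ' ') then i else fslScanA l rest

def find_second_last_period_first_number (string : String) : Int :=
  let l := string.toList
  let st := (PySem.List.enumerate l).foldl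
      (fun (p : Int × Int) ic => if ic.2 = '.' then (p.2, ic.1) else p) (-1, -1)
  if st.1 ≠ -1 then fslScanA l (PySem.List.pyRange (st.1 + 1) l.length 1)
  else -1

-- ===== PORT B =====
-- B's single pass; state = (periods, d_last, d_second), rotated on each '.'
def fslStepB (s : Int × Int × Int) (ic : Int × Char) : Int × Int × Int :=
  if ic.2 = '.' then (s.1 + 1, -1, s.2.1)
  else if PySem.Chars.isdigit ic.2 then
    (s.1,
     (if 1 ≤ s.1 ∧ s.2.1 = -1 then ic.1 else s.2.1),
     (if 2 ≤ s.1 ∧ s.2.2 = -1 then ic.1 else s.2.2))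
  else s

def find_second_last_period_first_number_alt (string : String) : Int :=
  let l := string.toList
  let st := (PySem.List.enumerate l).foldl fslStepB (0, -1, -1)
  if 2 ≤ st.1 then st.2.2 else -1

-- ===== PRECONDITION & SPEC =====
def Spec_find_second_last_period_first_number (string : String) (out : Int) : Prop := out = find_second_last_period_first_number_alt string
instance (string : String) (out : Int) : Decidable (Spec_find_second_last_period_first_number string out) := by unfold Spec_find_second_last_period_first_number; infer_instance

-- ===== CLAIM (what is proved, stated in full; the proofs are below) =====
def Claim_equal_find_second_last_period_first_number : Prop := ∀ (string : String), Dom_find_second_last_period_first_number string → Spec_find_second_last_period_first_number string (find_second_last_period_first_number string)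

-- ===== LEMMAS AND PROOFS =====

-- the index of the last '.' in l (or -1) — the characterisation both ports are reduced to
def dotIdx (l : List Char) : Int :=
  match l.reverse.findIdx? (fun c => c = '.') with
  | some j => (l.length : Int) - 1 - j
  | none => -1
def dotIdx2 (l : List Char) : Int := dotIdx (l.take (dotIdx l).toNat)
def fda (l : List Char) (i : Int) : Int :=
  match (l.drop (i + 1).toNat).findIdx? (fun c => PySem.Chars.isdigit c) with
  | some j => i + 1 + j
  | none => -1
theorem dotIdx_nil : dotIdx [] = -1 := rfl
theorem findIdx?_dot_lt {l : List Char} {j : Nat} {p : Char → Bool}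
    (h : l.findIdx? p = some j) : j < l.length := by
  have := List.findIdx?_eq_some_iff_findIdx_eq.mp h
  omega
theorem dotIdx_append (l : List Char) (c : Char) :
    dotIdx (l ++ [c]) = if c = '.' then (l.length : Int) else dotIdx l := by
  unfold dotIdx
  rw [List.reverse_append, List.reverse_singleton, List.singleton_append, List.findIdx?_cons]
  by_cases h : c = '.'
  · simp [h]
  · rw [if_neg (by simp [h]), if_neg h]
    cases hf : l.reverse.findIdx? (fun x => decide (x = '.')) with
    | none => simp
    | some j =>
        simp only [Option.map_some]
        simp
        ring
theorem dotIdx_lb (l : List Char) : -1 ≤ dotIdx l := by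
  unfold dotIdx
  cases hf : l.reverse.findIdx? (fun x => decide (x = '.')) with
  | none => simp
  | some j =>
      have hj : j < l.reverse.length := findIdx?_dot_lt hf
      simp at hj
      simp
      omega
theorem dotIdx_lt (l : List Char) : dotIdx l < l.length := by
  unfold dotIdx
  cases hf : l.reverse.findIdx? (fun x => decide (x = '.')) with
  | none => simp; omega
  | some j => simp; omega
theorem countP_eq_zero_iff_dotIdx (l : List Char) :
    l.countP (fun c => c = '.') = 0 ↔ dotIdx l = -1 := by
  induction l using List.reverseRecOn with
  | nil => simp [dotIdx_nil]
  | append_singleton t c ih =>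
      rw [List.countP_append, dotIdx_append]
      have hlb := dotIdx_lb t
      by_cases hc : c = '.'
      · simp [hc]
      · simp [hc, ih]
theorem dotIdx2_append_dot (l : List Char) :
    dotIdx2 (l ++ ['.']) = dotIdx l := by
  unfold dotIdx2
  rw [dotIdx_append]
  simp
theorem dotIdx2_append_ne (l : List Char) (c : Char) (hc : ¬ c = '.') :
    dotIdx2 (l ++ [c]) = dotIdx2 l := by
  unfold dotIdx2
  rw [dotIdx_append, if_neg hc]
  have hlb := dotIdx_lb l
  have hlt := dotIdx_lt l
  have : (dotIdx l).toNat ≤ l.length := by omega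
  rw [List.take_append_of_le_length this]
theorem countP_le_one_iff_dotIdx2 (l : List Char) :
    l.countP (fun c => c = '.') ≤ 1 ↔ dotIdx2 l = -1 := by
  induction l using List.reverseRecOn with
  | nil => simp [dotIdx2, dotIdx_nil]
  | append_singleton t c ih =>
      rw [List.countP_append]
      by_cases hc : c = '.'
      · subst hc
        rw [dotIdx2_append_dot]
        simp [← countP_eq_zero_iff_dotIdx]
      · rw [dotIdx2_append_ne t c hc]
        simp [hc, ih]
theorem fda_append (l : List Char) (c : Char) (i : Int) (h0 : -1 ≤ i) (h1 : i < l.length) :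
    fda (l ++ [c]) i
      = if fda l i = -1 then (if PySem.Chars.isdigit c then (l.length : Int) else -1)
        else fda l i := by
  unfold fda
  have hle : (i + 1).toNat ≤ l.length := by omega
  rw [List.drop_append_of_le_length hle, List.findIdx?_append]
  have hlen : (l.drop (i+1).toNat).length = l.length - (i+1).toNat := by simp
  cases hf : (l.drop (i + 1).toNat).findIdx? (fun c => PySem.Chars.isdigit c) with
  | some j =>
      have hj := List.findIdx?_eq_some_iff_findIdx_eq.mp hf
      have : ¬ (i + 1 + (j : Int) = -1) := by omega
      simp [this]
  | none =>
      rw [List.findIdx?_cons]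
      by_cases hd : PySem.Chars.isdigit c
      · simp [hd]
        omega
      · simp [hd]
theorem fda_of_le_len (l : List Char) (i : Int) (h : (l.length : Int) ≤ i + 1) :
    fda l i = -1 := by
  unfold fda
  rw [List.drop_eq_nil_of_le (by omega)]
  simp

theorem foldA_eq (l : List Char) :
    (PySem.List.enumerate l).foldl
        (fun (p : Int × Int) ic => if ic.2 = '.' then (p.2, ic.1) else p) (-1, -1)
      = ((if dotIdx l = -1 then -1 else dotIdx2 l), dotIdx l) := by
  induction l using List.reverseRecOn with
  | nil => simp [PySem.List.enumerate_nil, dotIdx_nil]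
  | append_singleton t c ih =>
      rw [PySem.List.enumerate_append, List.foldl_append, ih, dotIdx_append]
      by_cases hc : c = '.'
      · subst hc
        have hne : ¬ ((t.length : Int) = -1) := by omega
        simp [hne, PySem.List.enumerate_cons, PySem.List.enumerate_nil, dotIdx2_append_dot]
      · have hlt := dotIdx_lt t
        have hlb := dotIdx_lb t
        rw [dotIdx2_append_ne t c hc]
        simp [hc, PySem.List.enumerate_cons, PySem.List.enumerate_nil]
theorem foldB_eq (l : List Char) :
    (PySem.List.enumerate l).foldl fslStepB (0, -1, -1)
      = ((l.countP (fun c => c = '.') : Int),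
         (if l.countP (fun c => c = '.') = 0 then -1 else fda l (dotIdx l)),
         (if l.countP (fun c => c = '.') ≤ 1 then -1 else fda l (dotIdx2 l))) := by
  induction l using List.reverseRecOn with
  | nil => simp [PySem.List.enumerate_nil]
  | append_singleton t c ih =>
      rw [PySem.List.enumerate_append, List.foldl_append, ih, List.countP_append]
      have hlb := dotIdx_lb t
      have hlt := dotIdx_lt t
      have hlb2 : -1 ≤ dotIdx2 t := dotIdx_lb _
      have hlt2 : dotIdx2 t < t.length := by
        have h1 := dotIdx_lt (t.take (dotIdx t).toNat)
        have h2 : (t.take (dotIdx t).toNat).length ≤ t.length := by simp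
        unfold dotIdx2
        omega
      have hcz := countP_eq_zero_iff_dotIdx t
      have hco := countP_le_one_iff_dotIdx2 t
      simp only [PySem.List.enumerate_cons, PySem.List.enumerate_nil, List.foldl_cons,
        List.foldl_nil, fslStepB]
      by_cases hc : c = '.'
      · subst hc
        rw [dotIdx_append, dotIdx2_append_dot]
        have hnew : fda (t ++ ['.']) (t.length : Int) = -1 :=
          fda_of_le_len _ _ (by simp)
        by_cases h0 : t.countP (fun c => c = '.') = 0
        · have hd : dotIdx t = -1 := hcz.mp h0
          simp [h0, hnew]
        · have hd : ¬ dotIdx t = -1 := fun h => h0 (hcz.mpr h)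
          rw [fda_append t '.' (dotIdx t) (by omega) hlt]
          have hdig : ¬ PySem.Chars.isdigit '.' = true := by decide
          have h2 : ¬ (t.countP (fun c => c = '.') + 1 = 0) := by omega
          have h3 : ¬ (t.countP (fun c => c = '.') + 1 ≤ 1) := by omega
          simp [hdig, h3, h0, hnew]
      · rw [dotIdx_append, if_neg hc, dotIdx2_append_ne t c hc]
        have hcc : (List.countP (fun x => decide (x = '.')) [c]) = 0 := by simp [hc]
        rw [hcc]
        simp only [hc, if_false, Nat.add_zero]
        by_cases hd : PySem.Chars.isdigit c
        · simp only [hd, if_true, Prod.mk.injEq]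
          refine ⟨trivial, ?_, ?_⟩
          · by_cases h0 : t.countP (fun c => c = '.') = 0
            · simp [h0]
            · have hdne : ¬ dotIdx t = -1 := fun h => h0 (hcz.mpr h)
              have h1 : 1 ≤ ((t.countP (fun c => c = '.') : Nat) : Int) := by omega
              rw [fda_append t c (dotIdx t) (by omega) hlt]
              simp only [hd, if_true, h0, if_false, h1, true_and]
              split_ifs with h <;> simp
          · by_cases h0 : t.countP (fun c => c = '.') ≤ 1
            · have : ¬ (2 ≤ ((t.countP (fun c => c = '.') : Nat) : Int)) := by omega
              simp [h0, this]
            · have h2 : 2 ≤ ((t.countP (fun c => c = '.') : Nat) : Int) := by omega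
              rw [fda_append t c (dotIdx2 t) (by omega) hlt2]
              simp only [hd, if_true, h0, if_false, h2, true_and]
              split_ifs with h <;> simp
        · rw [if_neg hd]
          have e1 : fda (t ++ [c]) (dotIdx t) = fda t (dotIdx t) := by
            rw [fda_append t c (dotIdx t) hlb hlt]
            split_ifs with h
            · exact h.symm
            · rfl
          have e2 : fda (t ++ [c]) (dotIdx2 t) = fda t (dotIdx2 t) := by
            rw [fda_append t c (dotIdx2 t) hlb2 hlt2]
            split_ifs with h
            · exact h.symm
            · rfl
          rw [e1, e2]
theorem scanA_eq (l : List Char) (t : List Char) (off : Int)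
    (h0 : 0 ≤ off) (ht : t = l.drop off.toNat) :
    fslScanA l (PySem.List.pyRange off l.length 1)
      = match t.findIdx? (fun c => PySem.Chars.isdigit c) with
        | some j => off + j
        | none => -1 := by
  induction t generalizing off with
  | nil =>
      have hle : l.length ≤ off.toNat := by
        by_contra h
        have : l.drop off.toNat ≠ [] := by
          simp [List.drop_eq_nil_iff]; omega
        exact this ht.symm
      rw [PySem.List.pyRange_one_eq_nil (by omega)]
      simp [fslScanA]
  | cons c r ih =>
      have hlt : off.toNat < l.length := by
        by_contra h
        rw [List.drop_eq_nil_of_le (by omega)] at ht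
        exact (List.cons_ne_nil c r) ht
      have hofflt : off < (l.length : Int) := by omega
      rw [PySem.List.pyRange_one_cons hofflt]
      have hget : PySem.List.pyGetD l off ' ' = l[off.toNat] :=
        PySem.List.pyGetD_eq_getElem l ' ' h0 (by exact_mod_cast hofflt)
      have hc : l[off.toNat] = c := by
        have := List.drop_eq_getElem_cons hlt
        rw [← ht] at this
        exact (List.cons.injEq _ _ _ _ ▸ this).1.symm
      have hr : r = l.drop (off + 1).toNat := by
        have := List.drop_eq_getElem_cons hlt
        rw [← ht] at this
        have h2 : r = l.drop (off.toNat + 1) := (List.cons.injEq _ _ _ _ ▸ this).2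
        rw [h2]
        congr 1
        omega
      simp only [fslScanA, hget, hc]
      by_cases hd : PySem.Chars.isdigit c
      · simp [hd, List.findIdx?_cons]
      · rw [if_neg (by simp [hd]), ih (off + 1) (by omega) hr]
        simp only [List.findIdx?_cons, hd]
        simp
        cases r.findIdx? (fun c => PySem.Chars.isdigit c) with
        | none => simp
        | some j => simp; ring_nf

-- ===== VERDICT (by name: the statement is the Claim_ definition above) =====
theorem find_second_last_period_first_number_spec : Claim_equal_find_second_last_period_first_number := by
  intro s _
  unfold Spec_find_second_last_period_first_number
  unfold find_second_last_period_first_number find_second_last_period_first_number_alt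
  simp only []
  set l := s.toList with hl
  rw [foldA_eq, foldB_eq]
  have hcz := countP_eq_zero_iff_dotIdx l
  have hco := countP_le_one_iff_dotIdx2 l
  have hlb2 : -1 ≤ dotIdx2 l := dotIdx_lb _
  by_cases h2 : 2 ≤ ((l.countP (fun c => c = '.') : Nat) : Int)
  · have hne0 : ¬ l.countP (fun c => c = '.') = 0 := by omega
    have hne1 : ¬ l.countP (fun c => c = '.') ≤ 1 := by omega
    have hdne : ¬ dotIdx l = -1 := fun h => hne0 (hcz.mpr h)
    have hd2ne : ¬ dotIdx2 l = -1 := fun h => hne1 (hco.mpr h)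
    simp only [h2, hne1, if_false, hdne, hd2ne, ne_eq, not_false_iff, if_pos]
    rw [scanA_eq l (l.drop (dotIdx2 l + 1).toNat) (dotIdx2 l + 1) (by omega) rfl]
    unfold fda
    cases (l.drop (dotIdx2 l + 1).toNat).findIdx? (fun c => PySem.Chars.isdigit c) with
    | none => simp
    | some j => simp
  · have hle1 : l.countP (fun c => c = '.') ≤ 1 := by omega
    simp only [h2, if_false]
    by_cases h0 : dotIdx l = -1
    · simp [h0]
    · have hd2 : dotIdx2 l = -1 := hco.mp hle1
      simp [h0, hd2]
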